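-- pv_equiv track=rewrite | github.com/wyk18703232953/myResearch | codeComplex/data/filteredData/python/cubic/python_cubic_0269.py | generate_arrays
-- ===== SOURCE A (Python) =====
-- def generate_arrays(n, m, k):
--     # deterministic, scalable data generation
--     r = [(i * 2 + 1) % 100000 for i in range(n)]
--     g = [(i * 3 + 2) % 100000 for i in range(m)]
--     b = [(i * 5 + 3) % 100000 for i in range(k)]
--     r.sort()
--     g.sort()
--     b.sort()
--     return r, g, b
-- ===== SOURCE B (Python) =====
-- def _counting_sorted(a, b, n):
--     # counting sort over the fixed value range 0..99999
--     cnt = {}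
--     for i in range(n):
--         v = (a * i + b) % 100000
--         cnt[v] = cnt.get(v, 0) + 1
--     out = []
--     for v in range(100000):
--         out += [v] * cnt.get(v, 0)
--     return out
--
-- def generate_arrays(n, m, k):
--     return _counting_sorted(2, 1, n), _counting_sorted(3, 2, m), _counting_sorted(5, 3, k)
-- ===== Notes on version B (the rewrite author's own statement) =====
-- stated objective: alternative
-- what changed: replaces the three comparison sorts with a counting sort: one pass builds a value->count dict per array, then the sorted array is emitted by scanning the fixed 0..99999 value range in order
import Mathlib
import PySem

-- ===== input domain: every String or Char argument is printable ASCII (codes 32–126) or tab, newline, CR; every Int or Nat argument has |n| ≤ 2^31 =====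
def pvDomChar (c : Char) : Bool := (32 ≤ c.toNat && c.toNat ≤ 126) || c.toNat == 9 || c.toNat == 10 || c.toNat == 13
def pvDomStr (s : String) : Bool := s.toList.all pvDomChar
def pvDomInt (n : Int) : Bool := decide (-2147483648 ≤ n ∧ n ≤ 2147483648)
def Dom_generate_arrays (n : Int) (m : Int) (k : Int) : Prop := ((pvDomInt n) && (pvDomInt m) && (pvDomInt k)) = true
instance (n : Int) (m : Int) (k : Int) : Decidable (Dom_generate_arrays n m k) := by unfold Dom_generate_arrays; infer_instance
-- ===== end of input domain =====

-- B replaces A's three comparison sorts by a counting sort over the fixed value range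
-- 0..99999 (one counting pass per array, then the sorted array is emitted by scanning
-- the value range); same cost class in practice, a genuinely different algorithm.

-- ===== PORT A =====
def generate_arrays (n : Int) (m : Int) (k : Int) : List (List Int) :=
  let r := (PySem.List.pyRange 0 n 1).map (fun i => PySem.Int.mod (i * 2 + 1) 100000)
  let g := (PySem.List.pyRange 0 m 1).map (fun i => PySem.Int.mod (i * 3 + 2) 100000)
  let b := (PySem.List.pyRange 0 k 1).map (fun i => PySem.Int.mod (i * 5 + 3) 100000)
  [PySem.List.sorted r (fun x => x) false,
   PySem.List.sorted g (fun x => x) false,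
   PySem.List.sorted b (fun x => x) false]

-- ===== PORT B =====
-- port of Source B's _counting_sorted: count occurrences in a dict, then emit value range in order
def countingSorted (a : Int) (b : Int) (n : Int) : List Int :=
  let cnt : PySem.Dict Int Int :=
    (PySem.List.pyRange 0 n 1).foldl
      (fun d i =>
        let v := PySem.Int.mod (a * i + b) 100000
        d.insert v (d.getD v 0 + 1))
      PySem.Dict.empty
  (PySem.List.pyRange 0 100000 1).foldl
    (fun out v => out ++ PySem.List.pyRepeat [v] (cnt.getD v 0)) []

def generate_arrays_alt (n : Int) (m : Int) (k : Int) : List (List Int) :=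
  [countingSorted 2 1 n, countingSorted 3 2 m, countingSorted 5 3 k]

-- ===== PRECONDITION & SPEC =====
def Spec_generate_arrays (n : Int) (m : Int) (k : Int) (out : List (List Int)) : Prop := out = generate_arrays_alt n m k
instance (n : Int) (m : Int) (k : Int) (out : List (List Int)) : Decidable (Spec_generate_arrays n m k out) := by unfold Spec_generate_arrays; infer_instance

-- ===== CLAIM (what is proved, stated in full; the proofs are below) =====
def Claim_equal_generate_arrays : Prop := ∀ (n : Int) (m : Int) (k : Int), Dom_generate_arrays n m k → Spec_generate_arrays n m k (generate_arrays n m k)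

-- ===== LEMMAS AND PROOFS =====

-- count of x in a flatMap of replicates over a nodup value list
lemma count_flatMap_replicate (vs : List Int) (c : Int → Nat) (hnd : vs.Nodup) (x : Int) :
    (vs.flatMap (fun v => List.replicate (c v) v)).count x = if x ∈ vs then c x else 0 := by
  induction vs with
  | nil => simp
  | cons v vs ih =>
    simp only [List.nodup_cons] at hnd
    simp only [List.flatMap_cons, List.count_append, ih hnd.2, List.count_replicate,
      List.mem_cons]
    by_cases hxv : x = v
    · subst hxv
      simp [hnd.1]
    · simp [hxv, Ne.symm hxv]

-- the flatMap of replicates over a strictly increasing value list is sorted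
lemma pairwise_flatMap_replicate (vs : List Int) (c : Int → Nat)
    (h : vs.Pairwise (· < ·)) :
    (vs.flatMap (fun v => List.replicate (c v) v)).Pairwise (· ≤ ·) := by
  induction vs with
  | nil => simp
  | cons v vs ih =>
    rw [List.pairwise_cons] at h
    simp only [List.flatMap_cons, List.pairwise_append]
    refine ⟨?_, ih h.2, ?_⟩
    · exact List.pairwise_replicate.mpr (Or.inr (le_refl v))
    · intro x hx y hy
      rw [List.eq_of_mem_replicate hx]
      obtain ⟨w, hw, hyw⟩ := List.mem_flatMap.mp hy
      rw [List.eq_of_mem_replicate hyw]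
      exact le_of_lt (h.1 w hw)

-- the core fact: sorting A's raw array equals B's counting-sort output
lemma counting_sorted_eq (a b n : Int) :
    PySem.List.sorted
      ((PySem.List.pyRange 0 n 1).map (fun i => PySem.Int.mod (a * i + b) 100000))
      (fun x => x) false = countingSorted a b n := by
  set f : Int → Int := fun i => PySem.Int.mod (a * i + b) 100000 with hf
  set raw : List Int := (PySem.List.pyRange 0 n 1).map f with hraw
  -- B's dict is Counter(raw)
  have hcnt :
      (PySem.List.pyRange 0 n 1).foldl
        (fun d i =>
          let v := PySem.Int.mod (a * i + b) 100000
          (d : PySem.Dict Int Int).insert v (d.getD v 0 + 1))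
        PySem.Dict.empty = PySem.Dict.counter raw := by
    rw [hraw, ← PySem.Dict.foldl_insert_getD_add_one_eq_counter, List.foldl_map]
  -- B's output is the flatMap of replicates
  have hout : countingSorted a b n =
      (PySem.List.pyRange 0 100000 1).flatMap
        (fun v => List.replicate (raw.count v) v) := by
    unfold countingSorted
    rw [hcnt, PySem.List.foldl_append_eq_flatMap, List.nil_append]
    congr 1
    funext v
    rw [PySem.Dict.getD_counter, PySem.List.pyRepeat_singleton, Int.toNat_natCast]
  rw [hout]
  apply PySem.List.sorted_id_eq_of_perm_of_pairwise
  · -- permutation, via equal counts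
    rw [List.perm_iff_count]
    intro x
    rw [count_flatMap_replicate _ _ (PySem.List.nodup_pyRange_one 0 100000) x]
    by_cases hx : x ∈ PySem.List.pyRange 0 100000 1
    · simp [hx]
    · simp only [hx, if_false]
      symm
      rw [List.count_eq_zero]
      intro hmem
      apply hx
      rw [hraw, List.mem_map] at hmem
      obtain ⟨i, _, hi⟩ := hmem
      rw [PySem.List.mem_pyRange_one]
      constructor
      · rw [← hi]; exact PySem.Int.mod_nonneg _ (by norm_num)
      · rw [← hi]; exact PySem.Int.mod_lt _ (by norm_num)
  · exact pairwise_flatMap_replicate _ _ (PySem.List.pairwise_lt_pyRange_one 0 100000)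

-- ===== VERDICT (by name: the statement is the Claim_ definition above) =====
theorem generate_arrays_spec : Claim_equal_generate_arrays := by
  intro n m k _
  unfold Spec_generate_arrays generate_arrays generate_arrays_alt
  dsimp only
  have h2 : (fun i : Int => PySem.Int.mod (i * 2 + 1) 100000)
      = fun i : Int => PySem.Int.mod (2 * i + 1) 100000 := by funext i; rw [mul_comm]
  have h3 : (fun i : Int => PySem.Int.mod (i * 3 + 2) 100000)
      = fun i : Int => PySem.Int.mod (3 * i + 2) 100000 := by funext i; rw [mul_comm]
  have h5 : (fun i : Int => PySem.Int.mod (i * 5 + 3) 100000)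
      = fun i : Int => PySem.Int.mod (5 * i + 3) 100000 := by funext i; rw [mul_comm]
  rw [h2, h3, h5, counting_sorted_eq 2 1 n, counting_sorted_eq 3 2 m, counting_sorted_eq 5 3 k]
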